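-- pv_equiv track=rewrite | github.com/mytreyanjp/Programs_CEG | python/crypto-py/pythonn/receding_classes.py | generate_receding
-- ===== SOURCE A (Python) =====
-- def generate_receding(m,ranged):
--     classes={}
--     for a in range(m):
--         classes[a]=[]
--         for k in range(-ranged,ranged+1):
--             val=a+k*m
--             classes[a].append(val)
--     return classes
-- ===== SOURCE B (Python) =====
-- def generate_receding(m, ranged):
--     # No residue classes at all when m <= 0.
--     if m <= 0:
--         return {}
--     # Build ALL values as one contiguous block of consecutive integers,
--     # then distribute: residue class a is the strided slice block[a::m].
--     block = list(range(-ranged * m, ranged * m + m))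
--     return {a: block[a::m] for a in range(m)}
-- ===== Notes on version B (the rewrite author's own statement) =====
-- stated objective: alternative
-- what changed: Instead of computing each class's elements a+k*m in a nested loop, B materialises all values once as a single contiguous block list(range(-ranged*m, ranged*m+m)) and distributes them into classes by strided slicing block[a::m].
import Mathlib
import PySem

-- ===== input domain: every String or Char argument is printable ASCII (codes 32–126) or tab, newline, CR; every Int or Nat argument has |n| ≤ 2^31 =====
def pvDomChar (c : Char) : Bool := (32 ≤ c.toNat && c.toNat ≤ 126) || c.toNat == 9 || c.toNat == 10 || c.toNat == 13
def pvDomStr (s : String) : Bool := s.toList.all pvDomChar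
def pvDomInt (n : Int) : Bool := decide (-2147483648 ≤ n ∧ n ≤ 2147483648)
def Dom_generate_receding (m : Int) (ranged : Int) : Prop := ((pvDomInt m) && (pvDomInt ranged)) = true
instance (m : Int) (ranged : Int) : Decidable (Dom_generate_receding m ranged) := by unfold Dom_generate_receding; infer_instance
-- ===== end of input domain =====

-- B builds all values once as one contiguous block and distributes them to classes by strided slicing (objective: alternative).

-- ===== PORT A =====
-- for a in range(m): classes[a]=[]; for k in range(-ranged, ranged+1): classes[a].append(a+k*m)
def generate_receding (m : Int) (ranged : Int) : List (Int × List Int) :=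
  ((PySem.List.pyRange 0 m 1).foldl
    (fun classes a =>
      ((PySem.List.pyRange (-ranged) (ranged + 1) 1).foldl
        (fun cl k =>
          let val := a + k * m
          cl.insert a (cl.getD a [] ++ [val]))
        (classes.insert a [])))
    PySem.Dict.empty).items

-- ===== PORT B =====
-- if m <= 0: return {}
-- block = list(range(-ranged*m, ranged*m + m)); {a: block[a::m] for a in range(m)}
-- block[a::m] is slice? block (some a) none m; it is none only for step m = 0,
-- which never happens inside the comprehension (m > 0 past the guard), so .getD [] never fires.
def generate_receding_alt (m : Int) (ranged : Int) : List (Int × List Int) :=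
  if m ≤ 0 then []
  else
    let block := PySem.List.pyRange (-ranged * m) (ranged * m + m) 1
    (PySem.List.pyRange 0 m 1).map
      (fun a => (a, (PySem.List.slice? block (some a) none m).getD []))

-- ===== PRECONDITION & SPEC =====
def Spec_generate_receding (m : Int) (ranged : Int) (out : List (Int × List Int)) : Prop := out = generate_receding_alt m ranged
instance (m : Int) (ranged : Int) (out : List (Int × List Int)) : Decidable (Spec_generate_receding m ranged out) := by unfold Spec_generate_receding; infer_instance

-- ===== CLAIM (what is proved, stated in full; the proofs are below) =====
def Claim_equal_generate_receding : Prop := ∀ (m : Int) (ranged : Int), Dom_generate_receding m ranged → Spec_generate_receding m ranged (generate_receding m ranged)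

-- ===== LEMMAS AND PROOFS =====

-- A's inner loop repeatedly overwrites the entry at key a, accumulating the mapped list.
theorem inner_fold_insert {f : Int → Int} (ks : List Int) (cl : PySem.Dict Int (List Int))
    (a : Int) (v : List Int) :
    ks.foldl (fun cl k => cl.insert a (cl.getD a [] ++ [f k])) (cl.insert a v)
      = cl.insert a (v ++ ks.map f) := by
  induction ks generalizing v with
  | nil => simp
  | cons k ks ih =>
    simp only [List.foldl_cons, PySem.Dict.getD_insert_self, PySem.Dict.insert_insert_self]
    rw [ih]
    simp

-- B's strided slice of the contiguous block equals A's inner list, for 0 ≤ a < m.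
theorem slice_block (m r a : Int) (hm : 0 < m) (ha : 0 ≤ a) (ha2 : a < m) :
    (PySem.List.slice? (PySem.List.pyRange (-r * m) (r * m + m) 1) (some a) none m).getD []
      = (PySem.List.pyRange (-r) (r + 1) 1).map (fun k => a + k * m) := by
  by_cases hr : 0 ≤ r
  · -- r ≥ 0: both sides are the arithmetic progression a-r*m, …, a+r*m
    have hNpos : (0:Int) < (2 * r + 1) * m := by nlinarith
    rw [PySem.List.pyRange_one (-r * m) (r * m + m),
        show r * m + m - -r * m = (2 * r + 1) * m from by ring,
        PySem.List.pyRange_one (-r) (r + 1),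
        show r + 1 - -r = 2 * r + 1 from by ring]
    have hlen : ((List.range ((2 * r + 1) * m).toNat).map (fun j : Nat => -r * m + (j : Int))).length
        = ((2 * r + 1) * m).toNat := by simp
    have hcastN : ((((2 * r + 1) * m).toNat : Nat) : Int) = (2 * r + 1) * m := Int.toNat_of_nonneg hNpos.le
    have hale : a ≤ ((((2 * r + 1) * m).toNat : Nat) : Int) := by rw [hcastN]; nlinarith
    have halt : a < ((((2 * r + 1) * m).toNat : Nat) : Int) := by rw [hcastN]; nlinarith
    simp only [PySem.List.slice?, PySem.List.sliceIndices, hlen, if_neg hm.ne',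
      if_neg (not_lt.mpr hm.le), if_neg (not_lt.mpr ha), min_eq_left hale, if_pos hm, if_pos halt]
    have hcount : (((((2 * r + 1) * m).toNat : Nat) : Int) - a + m - 1) / m = 2 * r + 1 := by
      rw [hcastN, show (2 * r + 1) * m - a + m - 1 = (m - 1 - a) + (2 * r + 1) * m from by ring,
          Int.add_mul_ediv_right _ _ hm.ne', Int.ediv_eq_zero_of_lt (by omega) (by omega)]
      omega
    rw [hcount]
    simp only [Option.getD_some]
    rw [List.filterMap_congr (g := fun k : Nat => some (a + (-r + (k : Int)) * m)) ?_]
    · rw [show (fun k : Nat => some (a + (-r + (k : Int)) * m))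
          = some ∘ (fun k : Nat => a + (-r + (k : Int)) * m) from rfl,
        List.filterMap_eq_map, List.map_map]
      simp [Function.comp_def]
    · intro k hk
      have hk' : (k : Int) < 2 * r + 1 := by
        have := List.mem_range.mp hk
        omega
      have hidx : (0:Int) ≤ a + m * k := by positivity
      have hidxlt : a + m * (k : Int) < (2 * r + 1) * m := by nlinarith
      have hnat : (a + m * (k : Int)).toNat < ((2 * r + 1) * m).toNat := by omega
      rw [List.getElem?_map, List.getElem?_range hnat]
      simp only [Option.map_some]
      congr 1
      have hc : (((a + m * (k : Int)).toNat : Nat) : Int) = a + m * k := Int.toNat_of_nonneg hidx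
      rw [hc]
      ring
  · -- r < 0: block and the range of ks are both empty
    have hblock : PySem.List.pyRange (-r * m) (r * m + m) 1 = [] :=
      PySem.List.pyRange_one_eq_nil (by nlinarith)
    have hks : PySem.List.pyRange (-r) (r + 1) 1 = [] :=
      PySem.List.pyRange_one_eq_nil (by omega)
    rw [hblock, hks]
    simp only [PySem.List.slice?, PySem.List.sliceIndices]
    simp [hm.ne', if_neg (not_lt.mpr hm.le), ha, not_lt.mpr ha]

-- ===== VERDICT (by name: the statement is the Claim_ definition above) =====
theorem generate_receding_spec : Claim_equal_generate_receding := by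
  intro m ranged _
  unfold Spec_generate_receding generate_receding generate_receding_alt
  by_cases hm0 : m ≤ 0
  · rw [if_pos hm0, PySem.List.pyRange_one_eq_nil (a := 0) (b := m) (by omega)]
    simp [PySem.Dict.empty]
  rw [if_neg hm0]
  have hbody : ∀ (d : PySem.Dict Int (List Int)) (a : Int),
      (PySem.List.pyRange (-ranged) (ranged + 1) 1).foldl
        (fun cl k =>
          let val := a + k * m
          cl.insert a (cl.getD a [] ++ [val]))
        (d.insert a [])
      = d.insert a ((PySem.List.pyRange (-ranged) (ranged + 1) 1).map (fun k => a + k * m)) := by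
    intro d a
    simpa using inner_fold_insert (f := fun k => a + k * m)
      (PySem.List.pyRange (-ranged) (ranged + 1) 1) d a []
  simp only [hbody]
  have hfresh := PySem.Dict.items_foldl_insert_fresh
      (l := PySem.List.pyRange 0 m 1)
      (k := id)
      (v := fun a => (PySem.List.pyRange (-ranged) (ranged + 1) 1).map (fun k => a + k * m))
      (d := PySem.Dict.empty)
      (by intro a _; exact PySem.Dict.contains_empty _)
      (by simpa using PySem.List.nodup_pyRange_one 0 m)
  simp only [id] at hfresh
  rw [hfresh]
  simp only [PySem.Dict.empty, List.nil_append]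
  apply List.map_congr_left
  intro a ha
  have hmem := (PySem.List.mem_pyRange_one).mp ha
  have hm : 0 < m := lt_of_le_of_lt hmem.1 hmem.2
  rw [slice_block m ranged a hm hmem.1 hmem.2]
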